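-- pv_equiv track=rewrite | github.com/GetKlai/klai | klai-retrieval-api/retrieval_api/services/router.py | layer1_keyword
-- ===== SOURCE A (Python) =====
-- def layer1_keyword(
--     query_resolved: str, keyword_map: dict[str, set[str]]
-- ) -> list[str] | None:
--     """Layer 1: exact keyword matching. Returns matched source_labels or None."""
--     query_lower = query_resolved.lower()
--     matched: set[str] = set()
--     for term, source_labels in keyword_map.items():
--         if term in query_lower:
--             matched.update(source_labels)
--     return sorted(matched) if matched else None
-- ===== SOURCE B (Python) =====
-- def layer1_keyword(query_resolved, keyword_map):
--     """Layer 1: exact keyword matching via a precomputed substring index.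
--
--     Instead of scanning the query once per term, build the set of all
--     substrings of the query up to the longest term's length once, then
--     answer each term with a set lookup."""
--     query_lower = query_resolved.lower()
--     maxlen = 0
--     for term in keyword_map:
--         maxlen = max(maxlen, len(term))
--     subs = set()
--     for i in range(len(query_lower) + 1):
--         for l in range(maxlen + 1):
--             subs.add(query_lower[i:i + l])
--     matched = set()
--     for term, source_labels in keyword_map.items():
--         if term in subs:
--             matched.update(source_labels)
--     return sorted(matched) if matched else None
-- ===== Notes on version B (the rewrite author's own statement) =====
-- stated objective: faster
-- what changed: A tests each term against the query with a substring scan; B builds a hash set of all query substrings up to the longest term's length once, so each term becomes a single set lookup.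
import Mathlib
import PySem

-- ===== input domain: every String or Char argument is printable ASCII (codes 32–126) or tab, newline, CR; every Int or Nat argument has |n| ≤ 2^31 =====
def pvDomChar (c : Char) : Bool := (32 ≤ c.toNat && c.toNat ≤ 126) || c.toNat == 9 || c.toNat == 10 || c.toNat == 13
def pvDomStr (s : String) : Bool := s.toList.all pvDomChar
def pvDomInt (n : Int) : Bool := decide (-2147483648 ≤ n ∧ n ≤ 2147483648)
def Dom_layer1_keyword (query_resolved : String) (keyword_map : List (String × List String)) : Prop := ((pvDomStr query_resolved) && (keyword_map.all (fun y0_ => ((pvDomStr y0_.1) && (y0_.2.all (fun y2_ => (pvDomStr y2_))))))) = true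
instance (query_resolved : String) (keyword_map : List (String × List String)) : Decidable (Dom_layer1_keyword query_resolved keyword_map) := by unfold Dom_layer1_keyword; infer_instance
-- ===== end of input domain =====

-- B replaces A's per-term substring scan by a one-shot set of all query substrings
-- (up to the longest term) so each term is a single set lookup instead of a scan of the query (objective: faster; measured).


-- ===== PORT A =====
def layer1_keyword (query_resolved : String) (keyword_map : List (String × List String)) : Option (List String) :=
  let query_lower := PySem.Str.lower query_resolved
  let matched : PySem.Set String :=
    keyword_map.foldl (fun m p =>
      if PySem.Str.isIn p.1 query_lower then PySem.Set.update m p.2 else m) PySem.Set.empty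
  if matched = [] then none else some (PySem.List.sorted matched (fun x => x) false)

-- ===== PORT B =====
-- Python string slices query_lower[i:i+l] are represented as their character lists
-- (exact: two Strings are equal iff their toLists are equal).
def bMaxLen (keyword_map : List (String × List String)) : Int :=
  keyword_map.foldl (fun m p => max m (PySem.Str.len p.1)) 0

def bSubs (ql : List Char) (maxlen : Int) : PySem.Set (List Char) :=
  (PySem.List.pyRange 0 ((ql.length : Int) + 1) 1).foldl (fun s i =>
    (PySem.List.pyRange 0 (maxlen + 1) 1).foldl (fun s l =>
      PySem.Set.add s (PySem.List.slice ql (some i) (some (i + l)))) s) PySem.Set.empty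

def layer1_keyword_alt (query_resolved : String) (keyword_map : List (String × List String)) : Option (List String) :=
  let ql := (PySem.Str.lower query_resolved).toList
  let subs := bSubs ql (bMaxLen keyword_map)
  let matched : PySem.Set String :=
    keyword_map.foldl (fun m p =>
      if PySem.Set.contains subs p.1.toList then PySem.Set.update m p.2 else m) PySem.Set.empty
  if matched = [] then none else some (PySem.List.sorted matched (fun x => x) false)

-- ===== PRECONDITION & SPEC =====
def Spec_layer1_keyword (query_resolved : String) (keyword_map : List (String × List String)) (out : Option (List String)) : Prop := out = layer1_keyword_alt query_resolved keyword_map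
instance (query_resolved : String) (keyword_map : List (String × List String)) (out : Option (List String)) : Decidable (Spec_layer1_keyword query_resolved keyword_map out) := by unfold Spec_layer1_keyword; infer_instance

-- ===== CLAIM (what is proved, stated in full; the proofs are below) =====
def Claim_equal_layer1_keyword : Prop := ∀ (query_resolved : String) (keyword_map : List (String × List String)), Dom_layer1_keyword query_resolved keyword_map → Spec_layer1_keyword query_resolved keyword_map (layer1_keyword query_resolved keyword_map)

-- ===== LEMMAS AND PROOFS =====

-- membership in a doubly nested add-fold
theorem mem_foldl_foldl_add {α β γ : Type} [BEq γ] [LawfulBEq γ]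
    (r1 : List α) (r2 : List β) (f : α → β → γ) (s0 : PySem.Set γ) (y : γ) :
    y ∈ r1.foldl (fun s i => r2.foldl (fun s l => PySem.Set.add s (f i l)) s) s0 ↔
      y ∈ s0 ∨ ∃ i ∈ r1, ∃ l ∈ r2, y = f i l := by
  induction r1 generalizing s0 with
  | nil => simp
  | cons a as ih =>
    rw [List.foldl_cons, ih, PySem.Set.mem_foldl_add]
    constructor
    · rintro ((h | ⟨l, hl, rfl⟩) | ⟨i, hi, l, hl, rfl⟩)
      · exact Or.inl h
      · exact Or.inr ⟨a, List.mem_cons_self .., l, hl, rfl⟩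
      · exact Or.inr ⟨i, List.mem_cons_of_mem _ hi, l, hl, rfl⟩
    · rintro (h | ⟨i, hi, l, hl, rfl⟩)
      · exact Or.inl (Or.inl h)
      · rcases List.mem_cons.1 hi with rfl | hi
        · exact Or.inl (Or.inr ⟨l, hl, rfl⟩)
        · exact Or.inr ⟨i, hi, l, hl, rfl⟩

-- membership in the substring index
theorem mem_bSubs {ql : List Char} {m : Int} {t : List Char} :
    t ∈ bSubs ql m ↔ ∃ i l : Int, 0 ≤ i ∧ i ≤ (ql.length : Int) ∧ 0 ≤ l ∧ l ≤ m ∧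
      t = PySem.List.slice ql (some i) (some (i + l)) := by
  unfold bSubs
  rw [mem_foldl_foldl_add]
  simp only [PySem.List.mem_pyRange_one, PySem.Set.empty, List.not_mem_nil, false_or]
  constructor
  · rintro ⟨i, ⟨hi0, hi1⟩, l, ⟨hl0, hl1⟩, rfl⟩
    exact ⟨i, l, hi0, by omega, hl0, by omega, rfl⟩
  · rintro ⟨i, l, hi0, hi1, hl0, hl1, rfl⟩
    exact ⟨i, ⟨hi0, by omega⟩, l, ⟨hl0, by omega⟩, rfl⟩

-- for a term no longer than the index bound, index lookup ≡ substring test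
theorem mem_bSubs_iff_infix {ql t : List Char} {m : Int} (ht : (t.length : Int) ≤ m) :
    t ∈ bSubs ql m ↔ t <:+: ql := by
  rw [mem_bSubs]
  constructor
  · rintro ⟨i, l, hi0, hi1, hl0, hl1, rfl⟩
    rw [PySem.List.slice_toNat ql hi0 (by omega)]
    exact ((List.take_prefix _ _).isInfix).trans (List.drop_suffix _ _).isInfix
  · rintro ⟨a, b, hab⟩
    refine ⟨(a.length : Int), (t.length : Int), by omega, ?_, by omega, ht, ?_⟩
    · have : a.length ≤ ql.length := by
        rw [← hab]; simp
      exact_mod_cast this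
    · rw [PySem.List.slice_natCast_add, ← hab, List.append_assoc,
        List.drop_left, List.take_left]

-- the per-entry tests agree on every entry of the map
theorem cond_eq (q : String) (km : List (String × List String)) (p : String × List String)
    (hp : p ∈ km) :
    PySem.Str.isIn p.1 (PySem.Str.lower q) =
      PySem.Set.contains (bSubs (PySem.Str.lower q).toList (bMaxLen km)) p.1.toList := by
  have hlen : PySem.Str.len p.1 ≤ bMaxLen km :=
    (PySem.List.le_foldl_max_int km (fun p => PySem.Str.len p.1) 0).2 p hp
  rw [Bool.eq_iff_iff, PySem.Str.isIn_iff_infix, PySem.Set.contains_iff,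
    mem_bSubs_iff_infix (by simpa using hlen)]

theorem layer1_keyword_spec : Claim_equal_layer1_keyword := by
  intro q km _
  unfold Spec_layer1_keyword layer1_keyword layer1_keyword_alt
  have hfold :
      km.foldl (fun m p =>
          if PySem.Str.isIn p.1 (PySem.Str.lower q) then PySem.Set.update m p.2 else m)
        PySem.Set.empty =
      km.foldl (fun m p =>
          if PySem.Set.contains (bSubs (PySem.Str.lower q).toList (bMaxLen km)) p.1.toList
          then PySem.Set.update m p.2 else m) PySem.Set.empty :=
    PySem.List.foldl_congr_mem km _ _ PySem.Set.empty (fun acc p hp => by rw [cond_eq q km p hp])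
  simp only [hfold]
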